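-- pv_equiv track=rewrite | github.com/Jv131103/estudos_python | problemas/exercicio309.py | valida
-- ===== SOURCE A (Python) =====
-- import string
--
-- def valida(senha, case="mai"):
--     cases = {
--         "mai": string.ascii_uppercase,
--         "num": string.digits,
--         "min": string.ascii_lowercase,
--         "esp": string.punctuation
--     }
--     for valor in senha:
--         if valor in cases[case]:
--             return True
--     return False
-- ===== SOURCE B (Python) =====
-- import string
--
-- def valida(senha, case="mai"):
--     cases = {
--         "mai": string.ascii_uppercase,
--         "num": string.digits,
--         "min": string.ascii_lowercase,
--         "esp": string.punctuation
--     }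
--     return bool(set(senha) & set(cases[case]))
-- ===== Notes on version B (the rewrite author's own statement) =====
-- stated objective: idiomatic
-- what changed: The explicit character loop with early return is replaced by a single set-intersection: B builds set(senha) & set(cases[case]) and returns its truthiness, with no loop or early return.
-- outside the precondition, e.g. on valida('', 'xyz'): A returns False, B raises KeyError
import Mathlib
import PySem

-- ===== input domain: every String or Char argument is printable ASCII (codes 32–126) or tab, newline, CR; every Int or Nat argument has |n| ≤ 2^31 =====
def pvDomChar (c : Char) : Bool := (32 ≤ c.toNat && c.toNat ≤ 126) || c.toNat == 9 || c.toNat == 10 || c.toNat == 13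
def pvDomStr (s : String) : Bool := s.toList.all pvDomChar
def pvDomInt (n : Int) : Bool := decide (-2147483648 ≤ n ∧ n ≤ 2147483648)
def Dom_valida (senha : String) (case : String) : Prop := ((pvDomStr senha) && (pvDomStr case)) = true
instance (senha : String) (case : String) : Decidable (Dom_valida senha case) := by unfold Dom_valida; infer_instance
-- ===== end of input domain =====

-- B replaces A's per-character scan with a set intersection (idiomatic; same KeyError behaviour for unknown case names with nonempty senha).

-- ===== PORT A =====
-- the dict 'cases' built in both Pythons (string.ascii_uppercase / digits / ascii_lowercase / punctuation)
def validaCases : PySem.Dict String String :=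
  PySem.Dict.ofList
    [("mai", "ABCDEFGHIJKLMNOPQRSTUVWXYZ"),
     ("num", "0123456789"),
     ("min", "abcdefghijklmnopqrstuvwxyz"),
     ("esp", "!\"#$%&'()*+,-./:;<=>?@[\\]^_`{|}~")]

-- A's loop: for valor in senha: if valor in cases[case]: return True.  'valor in <string>' on a
-- single character is exactly char membership, ported as list membership on toList (exact here).
-- cases[case] is looked up at each iteration; a missing key (KeyError) is modelled as false and
-- excluded by Pre_valida (it is only reachable when senha is nonempty).
def validaLoop (cs : List Char) (case : String) : Bool :=
  match cs with
  | [] => false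
  | c :: rest =>
    match validaCases.get? case with
    | none => false  -- KeyError in Python; outside Pre_valida
    | some s => if s.toList.contains c then true else validaLoop rest case

def valida (senha : String) (case : String) : Bool :=
  validaLoop senha.toList case

-- ===== PORT B =====
-- bool(set(senha) & set(cases[case])): truthiness of the intersection = it is nonempty.
def valida_alt (senha : String) (case : String) : Bool :=
  match validaCases.get? case with
  | none => false  -- KeyError in Python; outside Pre_valida
  | some s => !(PySem.Set.inter (PySem.Set.ofList senha.toList) (PySem.Set.ofList s.toList)).isEmpty

-- ===== PRECONDITION & SPEC =====
-- Pre_ excludes unknown case names: there A raises KeyError whenever senha is nonempty, and its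
-- returning False on an empty senha with an unknown case is only an accident of evaluating
-- cases[case] inside the loop; B (naturally) raises KeyError on all such inputs.
def Pre_valida (senha : String) (case : String) : Prop :=
  case = "mai" ∨ case = "num" ∨ case = "min" ∨ case = "esp"
instance (senha : String) (case : String) : Decidable (Pre_valida senha case) := by
  unfold Pre_valida; infer_instance
def pvWitness_valida : String × String := ("aB3!", "mai")

def Spec_valida (senha : String) (case : String) (out : Bool) : Prop := out = valida_alt senha case
instance (senha : String) (case : String) (out : Bool) : Decidable (Spec_valida senha case out) := by
  unfold Spec_valida; infer_instance

-- ===== CLAIM (what is proved, stated in full; the proofs are below) =====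
def Claim_equal_valida : Prop := ∀ (senha : String) (case : String), Dom_valida senha case → Pre_valida senha case → Spec_valida senha case (valida senha case)

-- ===== LEMMAS AND PROOFS =====

-- the set intersection is nonempty exactly when some character of l lies in t
lemma any_contains_eq_not_isEmpty_inter (l t : List Char) :
    l.any (fun c => t.contains c)
      = !(PySem.Set.inter (PySem.Set.ofList l) (PySem.Set.ofList t)).isEmpty := by
  by_cases h : ∃ c ∈ l, c ∈ t
  · obtain ⟨c, hcl, hct⟩ := h
    have hmem : c ∈ PySem.Set.inter (PySem.Set.ofList l) (PySem.Set.ofList t) := by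
      rw [PySem.Set.mem_inter]
      exact ⟨(PySem.Set.mem_ofList _ _).mpr hcl, (PySem.Set.mem_ofList _ _).mpr hct⟩
    have h1 : l.any (fun c => t.contains c) = true := by
      simp only [List.any_eq_true]
      exact ⟨c, hcl, by simpa using hct⟩
    have h2 : (PySem.Set.inter (PySem.Set.ofList l) (PySem.Set.ofList t)).isEmpty = false := by
      rcases hx : PySem.Set.inter (PySem.Set.ofList l) (PySem.Set.ofList t) with _ | ⟨y, ys⟩
      · rw [hx] at hmem; cases hmem
      · simp
    rw [h1, h2]; rfl
  · push Not at h
    have h1 : l.any (fun c => t.contains c) = false := by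
      simp only [List.any_eq_false]
      intro c hcl
      simpa using h c hcl
    have h2 : (PySem.Set.inter (PySem.Set.ofList l) (PySem.Set.ofList t)).isEmpty = true := by
      rcases hx : PySem.Set.inter (PySem.Set.ofList l) (PySem.Set.ofList t) with _ | ⟨y, ys⟩
      · simp
      · exfalso
        have hy : y ∈ PySem.Set.inter (PySem.Set.ofList l) (PySem.Set.ofList t) := by
          rw [hx]; exact List.mem_cons_self
        rw [PySem.Set.mem_inter, PySem.Set.mem_ofList, PySem.Set.mem_ofList] at hy
        exact h y hy.1 hy.2
    rw [h1, h2]; rfl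

-- A's loop, when the lookup succeeds, is List.any over the allowed characters
lemma validaLoop_eq_any (l : List Char) (case s : String)
    (h : validaCases.get? case = some s) :
    validaLoop l case = l.any (fun c => s.toList.contains c) := by
  induction l with
  | nil => rfl
  | cons c rest ih =>
    simp [validaLoop, h, ih]

lemma valida_eq_alt_of_get (senha : String) (case s : String)
    (h : validaCases.get? case = some s) :
    valida senha case = valida_alt senha case := by
  unfold valida valida_alt
  rw [h, validaLoop_eq_any _ _ _ h, any_contains_eq_not_isEmpty_inter]

-- ===== VERDICT (by name: the statement is the Claim_ definition above) =====
theorem valida_spec : Claim_equal_valida := by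
  intro senha case _ hpre
  unfold Spec_valida
  rcases hpre with h | h | h | h <;> subst h
  · exact valida_eq_alt_of_get _ _ "ABCDEFGHIJKLMNOPQRSTUVWXYZ" (by decide)
  · exact valida_eq_alt_of_get _ _ "0123456789" (by decide)
  · exact valida_eq_alt_of_get _ _ "abcdefghijklmnopqrstuvwxyz" (by decide)
  · exact valida_eq_alt_of_get _ _ "!\"#$%&'()*+,-./:;<=>?@[\\]^_`{|}~" (by decide)
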